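-- pv_equiv track=rewrite | github.com/gramps-project/addons-source | WebSearch/db_file_table.py | _sort_record_fields
-- ===== SOURCE A (Python) =====
-- from collections import OrderedDict
--
-- def _sort_record_fields(record):
--     """Sort fields in a record: id → *_record_id → other → created_at → updated_at."""
--     id_part = [("id", record["id"])] if "id" in record else []
--
--     record_id_parts = [
--         (k, v) for k, v in record.items() if k.endswith("_record_id") and k != "id"
--     ]
--
--     tail_keys = []
--     if "created_at" in record:
--         tail_keys.append(("created_at", record["created_at"]))
--     if "updated_at" in record:
--         tail_keys.append(("updated_at", record["updated_at"]))
--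
--     core_keys = [
--         (k, v)
--         for k, v in record.items()
--         if k != "id"
--         and not k.endswith("_record_id")
--         and k != "created_at"
--         and k != "updated_at"
--     ]
--
--     return OrderedDict(id_part + record_id_parts + core_keys + tail_keys)
-- ===== SOURCE B (Python) =====
-- from collections import OrderedDict
--
--
-- def _rank(k):
--     if k == "id":
--         return 0
--     if k.endswith("_record_id"):
--         return 1
--     if k == "created_at":
--         return 3
--     if k == "updated_at":
--         return 4
--     return 2
--
--
-- def _sort_record_fields(record):
--     """Single pass: drop each field into one of five rank buckets, then concatenate."""
--     buckets = ([], [], [], [], [])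
--     for k, v in record.items():
--         buckets[_rank(k)].append((k, v))
--     return OrderedDict(buckets[0] + buckets[1] + buckets[2] + buckets[3] + buckets[4])
-- ===== Notes on version B (the rewrite author's own statement) =====
-- stated objective: alternative
-- what changed: Replaces A's four separate filtered passes (plus three membership lookups) and their concatenation with a single pass that drops each field into one of five rank buckets via a key-ranking helper, then concatenates the buckets.
import Mathlib
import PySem

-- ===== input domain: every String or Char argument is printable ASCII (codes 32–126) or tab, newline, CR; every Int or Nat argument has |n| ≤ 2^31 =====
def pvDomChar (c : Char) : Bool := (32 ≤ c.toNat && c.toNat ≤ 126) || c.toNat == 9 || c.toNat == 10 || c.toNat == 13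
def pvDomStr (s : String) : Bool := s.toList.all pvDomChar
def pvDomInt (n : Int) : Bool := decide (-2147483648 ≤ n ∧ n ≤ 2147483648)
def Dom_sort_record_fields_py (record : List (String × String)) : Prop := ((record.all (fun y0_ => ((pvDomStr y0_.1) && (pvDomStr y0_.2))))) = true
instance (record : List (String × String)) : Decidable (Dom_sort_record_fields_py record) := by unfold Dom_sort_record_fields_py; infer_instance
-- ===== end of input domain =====

-- B replaces A's four filtered passes and concatenation by a single pass that drops each
-- field into one of five rank buckets (alternative decomposition, one traversal instead of four).


-- ===== PORT A =====
def sort_record_fields_py (record : List (String × String)) : List (String × String) :=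
  let id_part : List (String × String) :=
    match record.lookup "id" with
    | some v => [("id", v)]
    | none => []
  let record_id_parts : List (String × String) :=
    record.filter (fun kv => PySem.Str.endswith kv.1 "_record_id" && kv.1 != "id")
  let tail_keys : List (String × String) :=
    (match record.lookup "created_at" with
     | some v => [("created_at", v)]
     | none => []) ++
    (match record.lookup "updated_at" with
     | some v => [("updated_at", v)]
     | none => [])
  let core_keys : List (String × String) :=
    record.filter (fun kv =>
      kv.1 != "id" && !(PySem.Str.endswith kv.1 "_record_id")
        && kv.1 != "created_at" && kv.1 != "updated_at")
  (PySem.Dict.ofList (id_part ++ record_id_parts ++ core_keys ++ tail_keys)).items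

-- ===== PORT B =====
def pvRank (k : String) : Int :=
  if k == "id" then 0
  else if PySem.Str.endswith k "_record_id" then 1
  else if k == "created_at" then 3
  else if k == "updated_at" then 4
  else 2

abbrev pvBuckets : Type :=
  List (String × String) × List (String × String) × List (String × String) ×
  List (String × String) × List (String × String)

def pvBucketStep (b : pvBuckets) (kv : String × String) : pvBuckets :=
  let r := pvRank kv.1
  if r == 0 then (b.1 ++ [kv], b.2.1, b.2.2.1, b.2.2.2.1, b.2.2.2.2)
  else if r == 1 then (b.1, b.2.1 ++ [kv], b.2.2.1, b.2.2.2.1, b.2.2.2.2)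
  else if r == 3 then (b.1, b.2.1, b.2.2.1, b.2.2.2.1 ++ [kv], b.2.2.2.2)
  else if r == 4 then (b.1, b.2.1, b.2.2.1, b.2.2.2.1, b.2.2.2.2 ++ [kv])
  else (b.1, b.2.1, b.2.2.1 ++ [kv], b.2.2.2.1, b.2.2.2.2)

def sort_record_fields_py_alt (record : List (String × String)) : List (String × String) :=
  let b := record.foldl pvBucketStep ([], [], [], [], [])
  (PySem.Dict.ofList (b.1 ++ b.2.1 ++ b.2.2.1 ++ b.2.2.2.1 ++ b.2.2.2.2)).items

-- ===== PRECONDITION & SPEC =====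
-- Pre_ excludes association lists with duplicate keys: those do not represent a Python dict
-- (both programs take a dict), and A's first-match/overwrite behaviour there is accidental.
def Pre_sort_record_fields_py (record : List (String × String)) : Prop :=
  (record.map Prod.fst).Nodup
instance (record : List (String × String)) : Decidable (Pre_sort_record_fields_py record) := by
  unfold Pre_sort_record_fields_py; infer_instance

def pvWitness_sort_record_fields_py : (List (String × String)) :=
  [("id", "1"), ("x_record_id", "9"), ("name", "n"), ("created_at", "c"), ("updated_at", "u")]

def Spec_sort_record_fields_py (record : List (String × String)) (out : List (String × String)) : Prop := out = sort_record_fields_py_alt record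
instance (record : List (String × String)) (out : List (String × String)) : Decidable (Spec_sort_record_fields_py record out) := by unfold Spec_sort_record_fields_py; infer_instance

-- ===== CLAIM (what is proved, stated in full; the proofs are below) =====
def Claim_equal_sort_record_fields_py : Prop := ∀ (record : List (String × String)), Dom_sort_record_fields_py record → Pre_sort_record_fields_py record → Spec_sort_record_fields_py record (sort_record_fields_py record)

-- ===== LEMMAS AND PROOFS =====

-- The bucket loop is the five rank-filters, appended to the running accumulators.
theorem pv_bucket_loop (l : List (String × String)) (a b c d e : List (String × String)) :
    l.foldl pvBucketStep (a, b, c, d, e) =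
      (a ++ l.filter (fun kv => pvRank kv.1 == 0),
       b ++ l.filter (fun kv => pvRank kv.1 == 1),
       c ++ l.filter (fun kv => !(pvRank kv.1 == 0) && !(pvRank kv.1 == 1)
              && !(pvRank kv.1 == 3) && !(pvRank kv.1 == 4)),
       d ++ l.filter (fun kv => pvRank kv.1 == 3),
       e ++ l.filter (fun kv => pvRank kv.1 == 4)) := by
  induction l generalizing a b c d e with
  | nil => simp
  | cons kv t ih =>
    simp only [List.foldl_cons, List.filter_cons]
    rw [pvBucketStep]
    by_cases h0 : pvRank kv.1 == 0
    · have h := eq_of_beq h0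
      simp [ih, h]
    · by_cases h1 : pvRank kv.1 == 1
      · have h := eq_of_beq h1
        simp [ih, h]
      · by_cases h3 : pvRank kv.1 == 3
        · have h := eq_of_beq h3
          simp [ih, h]
        · by_cases h4 : pvRank kv.1 == 4
          · have h := eq_of_beq h4
            simp [ih, h]
          · simp [h0, h1, h3, h4, ih]

-- With pairwise-distinct keys, first-match lookup of k names exactly the (≤ 1) pairs keyed k.
theorem pv_lookup_filter (k : String) (l : List (String × String))
    (h : (l.map Prod.fst).Nodup) :
    l.filter (fun kv => kv.1 == k) =
      (match l.lookup k with
       | some v => [(k, v)]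
       | none => ([] : List (String × String))) := by
  induction l with
  | nil => simp [List.lookup]
  | cons kv t ih =>
    simp only [List.map_cons, List.nodup_cons] at h
    obtain ⟨hk, ht⟩ := h
    obtain ⟨k1, v1⟩ := kv
    by_cases he : k1 = k
    · have hnil : t.filter (fun kv => kv.1 == k) = [] := by
        apply List.filter_eq_nil_iff.mpr
        intro x hx
        simp only [beq_iff_eq]
        intro hxk
        exact hk (by rw [he, ← hxk]; exact List.mem_map.mpr ⟨x, hx, rfl⟩)
      subst he
      simp [List.lookup, hnil]
    · simp [List.lookup, ih ht, beq_false_of_ne he,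
        show (k == k1) = false from beq_false_of_ne (fun hh => he hh.symm)]

theorem pv_rank0_iff (k : String) : (pvRank k == 0) = (k == "id") := by
  by_cases h0 : k = "id"
  · subst h0; decide
  by_cases hc : k = "created_at"
  · subst hc; decide
  by_cases hu : k = "updated_at"
  · subst hu; decide
  simp [pvRank, h0, hc, hu] <;> split_ifs <;> simp_all

theorem pv_rank1_iff (k : String) :
    (pvRank k == 1) = (PySem.Str.endswith k "_record_id" && k != "id") := by
  by_cases h0 : k = "id"
  · subst h0; decide
  by_cases hc : k = "created_at"
  · subst hc; decide
  by_cases hu : k = "updated_at"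
  · subst hu; decide
  simp [pvRank, h0, hc, hu] <;> split_ifs <;> simp_all

theorem pv_rank3_iff (k : String) : (pvRank k == 3) = (k == "created_at") := by
  by_cases h0 : k = "id"
  · subst h0; decide
  by_cases hc : k = "created_at"
  · subst hc; decide
  by_cases hu : k = "updated_at"
  · subst hu; decide
  simp [pvRank, h0, hc, hu] <;> split_ifs <;> simp_all

theorem pv_rank4_iff (k : String) : (pvRank k == 4) = (k == "updated_at") := by
  by_cases h0 : k = "id"
  · subst h0; decide
  by_cases hc : k = "created_at"
  · subst hc; decide
  by_cases hu : k = "updated_at"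
  · subst hu; decide
  simp [pvRank, h0, hc, hu] <;> split_ifs <;> simp_all

theorem pv_rank2_iff (k : String) :
    (!(pvRank k == 0) && !(pvRank k == 1) && !(pvRank k == 3) && !(pvRank k == 4))
      = (k != "id" && !(PySem.Str.endswith k "_record_id")
          && k != "created_at" && k != "updated_at") := by
  by_cases h0 : k = "id"
  · subst h0; decide
  by_cases hc : k = "created_at"
  · subst hc; decide
  by_cases hu : k = "updated_at"
  · subst hu; decide
  simp [pvRank, h0, hc, hu] <;> split_ifs <;> simp_all

-- ===== VERDICT (by name: the statement is the Claim_ definition above) =====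
theorem sort_record_fields_py_spec : Claim_equal_sort_record_fields_py := by
  intro record _hdom hpre
  unfold Spec_sort_record_fields_py
  simp only [sort_record_fields_py, sort_record_fields_py_alt]
  rw [pv_bucket_loop]
  simp only [List.nil_append]
  have e0 : record.filter (fun kv => pvRank kv.1 == 0)
      = (match record.lookup "id" with
         | some v => [("id", v)]
         | none => ([] : List (String × String))) := by
    rw [List.filter_congr (fun kv _ => pv_rank0_iff kv.1)]
    exact pv_lookup_filter "id" record hpre
  have e3 : record.filter (fun kv => pvRank kv.1 == 3)
      = (match record.lookup "created_at" with
         | some v => [("created_at", v)]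
         | none => ([] : List (String × String))) := by
    rw [List.filter_congr (fun kv _ => pv_rank3_iff kv.1)]
    exact pv_lookup_filter "created_at" record hpre
  have e4 : record.filter (fun kv => pvRank kv.1 == 4)
      = (match record.lookup "updated_at" with
         | some v => [("updated_at", v)]
         | none => ([] : List (String × String))) := by
    rw [List.filter_congr (fun kv _ => pv_rank4_iff kv.1)]
    exact pv_lookup_filter "updated_at" record hpre
  have e1 : record.filter (fun kv => pvRank kv.1 == 1)
      = record.filter (fun kv => PySem.Str.endswith kv.1 "_record_id" && kv.1 != "id") :=
    List.filter_congr (fun kv _ => pv_rank1_iff kv.1)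
  have e2 : record.filter (fun kv => !(pvRank kv.1 == 0) && !(pvRank kv.1 == 1)
              && !(pvRank kv.1 == 3) && !(pvRank kv.1 == 4))
      = record.filter (fun kv => kv.1 != "id" && !(PySem.Str.endswith kv.1 "_record_id")
          && kv.1 != "created_at" && kv.1 != "updated_at") :=
    List.filter_congr (fun kv _ => pv_rank2_iff kv.1)
  rw [e0, e1, e2, e3, e4]
  simp [List.append_assoc]
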